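-- pv_equiv track=rewrite | github.com/GH-Lim/AlgorithmPractice | problems/programmers/2020kakao/괄호 변환.py | split_balance
-- ===== SOURCE A (Python) =====
-- def split_balance(string):
--     stack = []
--     open_cnt = 0
--     close_cnt = 0
--     u_is_correct = True
--     split_idx = 0
--     for idx in range(len(string)):
--         if string[idx] == '(':
--             if u_is_correct:
--                 stack.append('(')
--             open_cnt += 1
--         else:
--             if stack and u_is_correct:
--                 stack.pop()
--             else:
--                 u_is_correct = False
--             close_cnt += 1
--         if open_cnt == close_cnt:
--             split_idx = idx
--             break
--     u = string[:split_idx + 1]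
--     v = string[split_idx + 1:]
--     return u, v, u_is_correct
-- ===== SOURCE B (Python) =====
-- def split_balance(string):
--     # Pass 1: find the split index with a single balance counter (default 0).
--     split_idx = 0
--     bal = 0
--     for i, ch in enumerate(string):
--         bal += 1 if ch == '(' else -1
--         if bal == 0:
--             split_idx = i
--             break
--     u = string[:split_idx + 1]
--     v = string[split_idx + 1:]
--     # Pass 2: u is "correct" iff its running balance never goes negative.
--     ok = True
--     b = 0
--     for ch in u:
--         b += 1 if ch == '(' else -1
--         if b < 0:
--             ok = False
--     return u, v, ok
-- ===== Notes on version B (the rewrite author's own statement) =====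
-- stated objective: simpler
-- what changed: Replaces the single interleaved loop with a stack and open/close counters by two plain passes: one balance-counter scan to find the split index, then a separate never-goes-negative scan over u only (no stack).
import Mathlib
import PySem

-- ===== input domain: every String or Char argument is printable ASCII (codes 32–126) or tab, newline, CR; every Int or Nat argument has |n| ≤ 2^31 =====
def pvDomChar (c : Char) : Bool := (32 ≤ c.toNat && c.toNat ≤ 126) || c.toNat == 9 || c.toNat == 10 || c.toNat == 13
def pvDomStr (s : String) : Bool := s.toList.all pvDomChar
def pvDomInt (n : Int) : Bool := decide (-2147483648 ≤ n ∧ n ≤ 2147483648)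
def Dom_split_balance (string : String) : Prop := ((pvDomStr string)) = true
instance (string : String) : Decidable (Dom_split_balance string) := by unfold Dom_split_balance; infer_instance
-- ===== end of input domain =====

-- B replaces A's single interleaved stack-based loop by two plain passes (a balance counter
-- to find the split index, then a never-goes-negative scan over u only); objective: simpler.

-- ===== PORT A =====
-- A's for-loop with `break`: structural recursion over the remaining characters, carrying
-- idx, stack, open_cnt, close_cnt, u_is_correct; split_idx stays 0 if the loop never breaks.
def loopA : List Char → Nat → List Char → Int → Int → Bool → Nat × Bool
  | [], _, _, _, _, ok => (0, ok)
  | c :: cs, idx, stack, oc, cc, ok =>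
    if c = '(' then
      let stack' := if ok then '(' :: stack else stack
      let oc' := oc + 1
      if oc' = cc then (idx, ok) else loopA cs (idx + 1) stack' oc' cc ok
    else
      let p := if stack ≠ [] ∧ ok then (stack.tail, ok) else (stack, false)
      let cc' := cc + 1
      if oc = cc' then (idx, p.2) else loopA cs (idx + 1) p.1 oc cc' p.2

-- string[:k+1] / string[k+1:] with a nonnegative in-range bound are exactly take/drop on the code points.
def split_balance (string : String) : String × String × Bool :=
  let cs := string.toList
  let r := loopA cs 0 [] 0 0 true
  (String.ofList (cs.take (r.1 + 1)), String.ofList (cs.drop (r.1 + 1)), r.2)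

-- ===== PORT B =====
-- B's pass 1: balance counter, first index where it hits 0 (default 0).
def findB : List Char → Nat → Int → Nat
  | [], _, _ => 0
  | c :: cs, i, b =>
    let b' := b + (if c = '(' then 1 else -1)
    if b' = 0 then i else findB cs (i + 1) b'

-- B's pass 2 over u: running balance, ok cleared whenever it goes negative.
def okF (u : List Char) (b0 : Int) (ok0 : Bool) : Int × Bool :=
  u.foldl (fun (s : Int × Bool) c =>
      let b' := s.1 + (if c = '(' then 1 else -1)
      (b', s.2 && !(decide (b' < 0)))) (b0, ok0)

def okB (u : List Char) : Bool := (okF u 0 true).2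

def split_balance_alt (string : String) : String × String × Bool :=
  let cs := string.toList
  let si := findB cs 0 0
  let u := cs.take (si + 1)
  let v := cs.drop (si + 1)
  (String.ofList u, String.ofList v, okB u)

-- ===== PRECONDITION & SPEC =====
def Spec_split_balance (string : String) (out : String × String × Bool) : Prop := out = split_balance_alt string
instance (string : String) (out : String × String × Bool) : Decidable (Spec_split_balance string out) := by unfold Spec_split_balance; infer_instance

-- ===== CLAIM (what is proved, stated in full; the proofs are below) =====
def Claim_equal_split_balance : Prop := ∀ (string : String), Dom_split_balance string → Spec_split_balance string (split_balance string)

-- ===== LEMMAS AND PROOFS =====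

-- A's loop with its state abstracted to (running balance, ok).
def goB : List Char → Nat → Int → Bool → Nat × Bool
  | [], _, _, ok => (0, ok)
  | c :: cs, i, b, ok =>
    let b' := b + (if c = '(' then 1 else -1)
    let ok' := ok && !(decide (b' < 0))
    if b' = 0 then (i, ok') else goB cs (i + 1) b' ok'

-- offset of the first prefix (from balance b) whose running balance is zero
def brk : List Char → Int → Option Nat
  | [], _ => none
  | c :: cs, b =>
    let b' := b + (if c = '(' then 1 else -1)
    if b' = 0 then some 0 else (brk cs b').map (· + 1)

-- A's loop equals the abstracted loop: while ok holds, the stack length is the balance.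
theorem loopA_eq_goB : ∀ (cs : List Char) (idx : Nat) (stack : List Char) (oc cc : Int)
    (ok : Bool), (ok = true → 0 ≤ oc - cc ∧ (stack.length : Int) = oc - cc) →
    loopA cs idx stack oc cc ok = goB cs idx (oc - cc) ok := by
  intro cs
  induction cs with
  | nil => intro idx stack oc cc ok _; rfl
  | cons c cs ih =>
    intro idx stack oc cc ok hinv
    simp only [loopA, goB]
    cases ok with
    | false =>
      by_cases hc : c = '('
      · rw [if_pos hc, if_pos hc, if_neg Bool.false_ne_true,
          show (false && !decide ((oc - cc + 1) < 0)) = false from rfl]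
        by_cases hbrk : oc + 1 = cc
        · rw [if_pos hbrk, if_pos (by omega : oc - cc + 1 = 0)]
        · rw [if_neg hbrk, if_neg (by omega : ¬ oc - cc + 1 = 0),
            show oc - cc + 1 = oc + 1 - cc by omega]
          exact ih _ _ _ _ _ (by simp)
      · rw [if_neg hc, if_neg hc,
          if_neg (fun h : stack ≠ [] ∧ false = true => Bool.false_ne_true h.2),
          show (false && !decide ((oc - cc + -1) < 0)) = false from rfl]
        by_cases hbrk : oc = cc + 1
        · rw [if_pos hbrk, if_pos (by omega : oc - cc + -1 = 0)]
        · rw [if_neg hbrk, if_neg (by omega : ¬ oc - cc + -1 = 0),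
            show oc - cc + -1 = oc - (cc + 1) by omega]
          exact ih _ _ _ _ _ (by simp)
    | true =>
      obtain ⟨hge, hlen⟩ := hinv rfl
      by_cases hc : c = '('
      · rw [if_pos hc, if_pos hc, if_pos rfl,
          show (true && !decide ((oc - cc + 1) < 0)) = true by simp; omega]
        by_cases hbrk : oc + 1 = cc
        · exact absurd hbrk (by omega)
        · rw [if_neg hbrk, if_neg (by omega : ¬ oc - cc + 1 = 0),
            show oc - cc + 1 = oc + 1 - cc by omega]
          refine ih _ _ _ _ _ (fun _ => ⟨by omega, ?_⟩)
          simp only [List.length_cons]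
          push_cast
          omega
      · rw [if_neg hc, if_neg hc]
        cases stack with
        | nil =>
          have hz : oc - cc = 0 := by simpa using hlen.symm
          rw [if_neg (fun h : ([] : List Char) ≠ [] ∧ true = true => h.1 rfl),
            show (true && !decide ((oc - cc + -1) < 0)) = false by simp; omega]
          by_cases hbrk : oc = cc + 1
          · rw [if_pos hbrk, if_pos (by omega : oc - cc + -1 = 0)]
          · rw [if_neg hbrk, if_neg (by omega : ¬ oc - cc + -1 = 0),
              show oc - cc + -1 = oc - (cc + 1) by omega]
            exact ih _ _ _ _ _ (by simp)
        | cons x xs =>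
          have hpos : 0 < oc - cc := by simp at hlen; omega
          rw [if_pos (show x :: xs ≠ [] ∧ true = true from ⟨List.cons_ne_nil x xs, rfl⟩),
            show (true && !decide ((oc - cc + -1) < 0)) = true by simp; omega]
          by_cases hbrk : oc = cc + 1
          · rw [if_pos hbrk, if_pos (by omega : oc - cc + -1 = 0)]
          · rw [if_neg hbrk, if_neg (by omega : ¬ oc - cc + -1 = 0),
              show oc - cc + -1 = oc - (cc + 1) by omega]
            refine ih _ _ _ _ _ (fun _ => ⟨by omega, ?_⟩)
            simp only [List.tail_cons]
            simp at hlen ⊢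
            omega

theorem findB_eq_brk : ∀ (cs : List Char) (i : Nat) (b : Int),
    findB cs i b = (match brk cs b with | some k => i + k | none => 0) := by
  intro cs
  induction cs with
  | nil => intro i b; rfl
  | cons c cs ih =>
    intro i b
    simp only [findB, brk]
    by_cases h : b + (if c = '(' then 1 else -1) = 0
    · rw [if_pos h, if_pos h]; simp
    · rw [if_neg h, if_neg h, ih]
      cases hh : brk cs (b + (if c = '(' then 1 else -1)) with
      | none => simp
      | some k => show i + 1 + k = i + (k + 1); omega

theorem goB_fst_eq : ∀ (cs : List Char) (i : Nat) (b : Int) (ok : Bool),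
    (goB cs i b ok).1 = (match brk cs b with | some k => i + k | none => 0) := by
  intro cs
  induction cs with
  | nil => intro i b ok; rfl
  | cons c cs ih =>
    intro i b ok
    simp only [goB, brk]
    by_cases h : b + (if c = '(' then 1 else -1) = 0
    · rw [if_pos h, if_pos h]; simp
    · rw [if_neg h, if_neg h, ih]
      cases hh : brk cs (b + (if c = '(' then 1 else -1)) with
      | none => simp
      | some k => show i + 1 + k = i + (k + 1); omega

theorem goB_snd_eq : ∀ (cs : List Char) (i : Nat) (b : Int) (ok : Bool),
    (goB cs i b ok).2 = (match brk cs b with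
      | some k => (okF (cs.take (k + 1)) b ok).2
      | none => (okF cs b ok).2) := by
  intro cs
  induction cs with
  | nil => intro i b ok; rfl
  | cons c cs ih =>
    intro i b ok
    simp only [goB, brk]
    by_cases h : b + (if c = '(' then 1 else -1) = 0
    · rw [if_pos h, if_pos h]
      simp [okF, h]
    · rw [if_neg h, if_neg h, ih]
      cases hh : brk cs (b + (if c = '(' then 1 else -1)) with
      | none => simp [okF]
      | some k => simp [okF]

theorem okF_false : ∀ (cs : List Char) (b : Int), (okF cs b false).2 = false := by
  intro cs
  induction cs with
  | nil => intro b; rfl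
  | cons c cs ih => intro b; simpa [okF] using ih _

theorem okF_pos_of_no_brk : ∀ (cs : List Char) (b : Int), 0 < b → brk cs b = none →
    (okF cs b true).2 = true := by
  intro cs
  induction cs with
  | nil => intro b _ _; rfl
  | cons c cs ih =>
    intro b hb hbrk
    simp only [brk] at hbrk
    by_cases h : b + (if c = '(' then 1 else -1) = 0
    · rw [if_pos h] at hbrk; exact absurd hbrk (by simp)
    · rw [if_neg h] at hbrk
      have hbrk' : brk cs (b + (if c = '(' then 1 else -1)) = none := by
        cases hh : brk cs (b + (if c = '(' then 1 else -1)) with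
        | none => rfl
        | some k => rw [hh] at hbrk; simp at hbrk
      have hpos : 0 < b + (if c = '(' then 1 else -1) := by
        by_cases hc : c = '(' <;> simp [hc] at h ⊢ <;> omega
      have hnn : ¬ (b + (if c = '(' then 1 else -1) < 0) := by omega
      simpa [okF, hnn] using ih _ hpos hbrk'

-- ===== VERDICT (by name: the statement is the Claim_ definition above) =====
theorem split_balance_spec : Claim_equal_split_balance := by
  unfold Claim_equal_split_balance Spec_split_balance
  intro s _
  simp only [split_balance, split_balance_alt]
  rw [loopA_eq_goB s.toList 0 [] 0 0 true (by simp), show (0 : Int) - 0 = 0 by omega,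
    findB_eq_brk]
  have hfst := goB_fst_eq s.toList 0 0 true
  have hsnd := goB_snd_eq s.toList 0 0 true
  cases hb : brk s.toList 0 with
  | some k =>
    rw [hb] at hfst hsnd
    simp only [hfst, hsnd]
    simp [okB]
  | none =>
    rw [hb] at hfst hsnd
    simp only [hfst, hsnd]
    refine congrArg _ (congrArg _ ?_)
    show (okF s.toList 0 true).2 = okB (s.toList.take (0 + 1))
    cases hcs : s.toList with
    | nil => rfl
    | cons c cs =>
      rw [hcs] at hb
      simp only [brk] at hb
      by_cases hz : (0 : Int) + (if c = '(' then 1 else -1) = 0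
      · rw [if_pos hz] at hb; exact absurd hb (by simp)
      · rw [if_neg hz] at hb
        have hb' : brk cs ((0 : Int) + (if c = '(' then 1 else -1)) = none := by
          cases hh : brk cs ((0 : Int) + (if c = '(' then 1 else -1)) with
          | none => rfl
          | some k => rw [hh] at hb; simp at hb
        by_cases hc : c = '('
        · rw [hc] at hb'
          have h1 := okF_pos_of_no_brk cs 1 (by omega) (by simpa using hb')
          show (okF (c :: cs) 0 true).2 = okB [c]
          rw [hc]
          show (okF cs (0 + 1) ((true && !(decide ((0:Int) + 1 < 0))))).2 = _
          rw [show ((true && !(decide ((0:Int) + 1 < 0)))) = true from rfl,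
            show (0 : Int) + 1 = 1 by omega, h1]
          rfl
        · show (okF (c :: cs) 0 true).2 = okB [c]
          have hcif : (if c = '(' then (1:Int) else -1) = -1 := if_neg hc
          show (okF cs ((0:Int) + (if c = '(' then 1 else -1))
              (true && !(decide (((0:Int) + (if c = '(' then 1 else -1)) < 0)))).2 = _
          rw [hcif, show (0:Int) + -1 = -1 by omega,
            show (true && !(decide ((-1 : Int) < 0))) = false from rfl, okF_false]
          show false = (okF [c] 0 true).2
          unfold okF
          simp [hcif]
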